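-- pv_equiv track=rewrite | github.com/minyiky/aoc-python | 2024/day14/solution.py | check_for_unique
-- ===== SOURCE A (Python) =====
-- from collections import defaultdict
--
-- def check_for_unique(
--     robots: dict[tuple[int, int], tuple[int, int]],
--     max_x: int,
--     max_y: int,
--     iteration: int,
-- ) -> bool:
--     contained_robots: dict[tuple[int, int], int] = defaultdict(bool)
--
--     for (x, y), (v_x, v_y) in robots.items():
--         r_x = (x + iteration * v_x) % (max_x + 1)
--         r_y = (y + iteration * v_y) % (max_y + 1)
--         if (r_x, r_y) in contained_robots:
--             return False
--         contained_robots[(r_x, r_y)] = True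
--
--     return True
-- ===== SOURCE B (Python) =====
-- def check_for_unique(
--     robots: dict[tuple[int, int], tuple[int, int]],
--     max_x: int,
--     max_y: int,
--     iteration: int,
-- ) -> bool:
--     w = max_x + 1
--     # encode each final position into a single cell index and sort;
--     # a duplicate position shows up as two equal adjacent cells
--     cells = sorted(
--         ((y + iteration * v_y) % (max_y + 1)) * w + (x + iteration * v_x) % w
--         for (x, y), (v_x, v_y) in robots.items()
--     )
--     for a, b in zip(cells, cells[1:]):
--         if a == b:
--             return False
--     return True
-- ===== Notes on version B (the rewrite author's own statement) =====
-- stated objective: alternative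
-- what changed: Replaces A's hash-set membership loop by encoding each final position as a single integer cell index, sorting the cells, and scanning adjacent pairs for an equal neighbour (sort-then-scan instead of hashing).
import Mathlib
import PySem

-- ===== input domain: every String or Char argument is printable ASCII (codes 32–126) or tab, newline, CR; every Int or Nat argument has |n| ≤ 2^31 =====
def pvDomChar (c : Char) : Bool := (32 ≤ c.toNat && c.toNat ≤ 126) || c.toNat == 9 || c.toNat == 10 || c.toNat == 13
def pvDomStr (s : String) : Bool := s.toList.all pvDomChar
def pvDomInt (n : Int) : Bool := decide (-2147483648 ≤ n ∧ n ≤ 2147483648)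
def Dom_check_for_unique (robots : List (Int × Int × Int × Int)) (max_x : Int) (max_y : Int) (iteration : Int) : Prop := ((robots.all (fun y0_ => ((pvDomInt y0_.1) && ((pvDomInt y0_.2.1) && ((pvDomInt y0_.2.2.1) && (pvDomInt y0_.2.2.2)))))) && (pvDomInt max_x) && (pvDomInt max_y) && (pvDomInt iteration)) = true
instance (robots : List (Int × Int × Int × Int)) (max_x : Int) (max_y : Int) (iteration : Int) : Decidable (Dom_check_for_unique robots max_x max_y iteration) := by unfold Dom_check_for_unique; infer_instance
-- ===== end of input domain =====

-- B replaces A's incremental hash-set membership loop by encoding each final position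
-- as one integer cell index, sorting the cells, and scanning adjacent pairs for equality
-- (alternative algorithm: sort-then-scan instead of hashing; same result).


-- ===== PORT A =====
-- the 'for … return False … return True' loop, with the defaultdict as a Dict used for membership
def cfuLoop (max_x max_y iteration : Int) (rs : List (Int × Int × Int × Int))
    (contained_robots : PySem.Dict (Int × Int) Bool) : Bool :=
  match rs with
  | [] => true
  | (x, y, v_x, v_y) :: rest =>
    let r_x := PySem.Int.mod (x + iteration * v_x) (max_x + 1)
    let r_y := PySem.Int.mod (y + iteration * v_y) (max_y + 1)
    if PySem.Dict.contains contained_robots (r_x, r_y) then false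
    else cfuLoop max_x max_y iteration rest (PySem.Dict.insert contained_robots (r_x, r_y) true)

def check_for_unique (robots : List (Int × Int × Int × Int)) (max_x : Int) (max_y : Int) (iteration : Int) : Bool :=
  cfuLoop max_x max_y iteration robots PySem.Dict.empty

-- ===== PORT B =====
-- the 'for a, b in zip(cells, cells[1:]): if a == b: return False' loop
def pvAdjLoop (ps : List (Int × Int)) : Bool :=
  match ps with
  | [] => true
  | (a, b) :: rest => if a == b then false else pvAdjLoop rest

def check_for_unique_alt (robots : List (Int × Int × Int × Int)) (max_x : Int) (max_y : Int) (iteration : Int) : Bool :=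
  let w := max_x + 1
  let cells := PySem.List.sorted (robots.map (fun r =>
      PySem.Int.mod (r.2.1 + iteration * r.2.2.2) (max_y + 1) * w
        + PySem.Int.mod (r.1 + iteration * r.2.2.1) w)) (fun c => c) false
  -- cells[1:] is cells.tail (exact for a list)
  pvAdjLoop (cells.zip cells.tail)

-- ===== PRECONDITION & SPEC =====
-- Pre_ excludes exactly the inputs where Python A raises ZeroDivisionError:
-- a nonempty robots list with max_x = -1 or max_y = -1 (the '% (max_x+1)' / '% (max_y+1)'
-- divisor is 0); Python B raises there too.
def Pre_check_for_unique (robots : List (Int × Int × Int × Int)) (max_x : Int) (max_y : Int) (iteration : Int) : Prop :=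
  robots = [] ∨ (max_x + 1 ≠ 0 ∧ max_y + 1 ≠ 0)
instance (robots : List (Int × Int × Int × Int)) (max_x : Int) (max_y : Int) (iteration : Int) : Decidable (Pre_check_for_unique robots max_x max_y iteration) := by unfold Pre_check_for_unique; infer_instance

def pvWitness_check_for_unique : (List (Int × Int × Int × Int)) × Int × Int × Int :=
  ([(0, 0, 1, 1), (1, 0, 2, 1)], 10, 6, 3)

def Spec_check_for_unique (robots : List (Int × Int × Int × Int)) (max_x : Int) (max_y : Int) (iteration : Int) (out : Bool) : Prop := out = check_for_unique_alt robots max_x max_y iteration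
instance (robots : List (Int × Int × Int × Int)) (max_x : Int) (max_y : Int) (iteration : Int) (out : Bool) : Decidable (Spec_check_for_unique robots max_x max_y iteration out) := by unfold Spec_check_for_unique; infer_instance

-- ===== CLAIM (what is proved, stated in full; the proofs are below) =====
def Claim_equal_check_for_unique : Prop := ∀ (robots : List (Int × Int × Int × Int)) (max_x : Int) (max_y : Int) (iteration : Int), Dom_check_for_unique robots max_x max_y iteration → Pre_check_for_unique robots max_x max_y iteration → Spec_check_for_unique robots max_x max_y iteration (check_for_unique robots max_x max_y iteration)

-- ===== LEMMAS AND PROOFS =====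

-- the per-robot final position both programs compute
def pvPos (max_x max_y iteration : Int) (r : Int × Int × Int × Int) : Int × Int :=
  (PySem.Int.mod (r.1 + iteration * r.2.2.1) (max_x + 1),
   PySem.Int.mod (r.2.1 + iteration * r.2.2.2) (max_y + 1))

-- A's loop succeeds iff the remaining positions are fresh and mutually distinct
theorem cfuLoop_iff (max_x max_y iteration : Int) (rs : List (Int × Int × Int × Int))
    (d : PySem.Dict (Int × Int) Bool) :
    cfuLoop max_x max_y iteration rs d = true ↔
      ((rs.map (pvPos max_x max_y iteration)).Nodup ∧
       ∀ p ∈ rs.map (pvPos max_x max_y iteration), p ∉ d.keys) := by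
  induction rs generalizing d with
  | nil => simp [cfuLoop]
  | cons r rest ih =>
    obtain ⟨x, y, v_x, v_y⟩ := r
    simp only [cfuLoop, List.map_cons, List.nodup_cons, List.mem_cons, pvPos]
    by_cases hc : (PySem.Int.mod (x + iteration * v_x) (max_x + 1),
        PySem.Int.mod (y + iteration * v_y) (max_y + 1)) ∈ d.keys
    · rw [if_pos ((PySem.Dict.contains_iff_mem_keys d _).2 hc)]
      constructor
      · intro h; exact absurd h (by simp)
      · rintro ⟨-, h⟩
        exact absurd hc (h _ (Or.inl rfl))
    · rw [if_neg (fun h => hc ((PySem.Dict.contains_iff_mem_keys d _).1 h)), ih]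
      constructor
      · rintro ⟨hn, hfresh⟩
        refine ⟨⟨?_, hn⟩, ?_⟩
        · intro hm
          have := hfresh _ hm
          simp [PySem.Dict.mem_keys_insert] at this
        · rintro p (rfl | hp)
          · exact hc
          · intro hk
            exact hfresh p hp (by rw [PySem.Dict.mem_keys_insert]; exact Or.inr hk)
      · rintro ⟨⟨hne, hn⟩, hfresh⟩
        refine ⟨hn, ?_⟩
        intro p hp hk
        rw [PySem.Dict.mem_keys_insert] at hk
        rcases hk with rfl | hk
        · exact hne hp
        · exact hfresh p (Or.inr hp) hk

-- B's adjacent-pair scan checks exactly 'no two neighbours equal'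
theorem pvAdjLoop_iff (l : List Int) :
    pvAdjLoop (l.zip l.tail) = true ↔ l.IsChain (· ≠ ·) := by
  induction l with
  | nil => simp [pvAdjLoop]
  | cons a t ih =>
    cases t with
    | nil => simp [pvAdjLoop]
    | cons b t' =>
      rw [List.tail_cons, List.zip_cons_cons, List.isChain_cons_cons]
      by_cases h : a = b
      · simp [pvAdjLoop, h]
      · simp only [pvAdjLoop, beq_iff_eq, h, if_false]
        rw [List.tail_cons] at ih
        rw [ih]
        simp [h]

-- a nonzero multiple cannot be smaller than the modulus in absolute value
theorem mul_eq_small (k w d : Int) (h : k * w = d) (hd : |d| < |w|) : k = 0 := by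
  by_contra hk
  have h1 : (1 : Int) ≤ |k| := Int.one_le_abs (by omega)
  have : |w| ≤ |k| * |w| := le_mul_of_one_le_left (abs_nonneg w) h1
  rw [← abs_mul, h] at this
  omega

-- the cell encoding is injective on pairs whose first component is a value of 'mod · w'
theorem encode_inj (w : Int) (hw : w ≠ 0) (p q : Int × Int)
    (hp : (0 < w → 0 ≤ p.1 ∧ p.1 < w) ∧ (w < 0 → w < p.1 ∧ p.1 ≤ 0))
    (hq : (0 < w → 0 ≤ q.1 ∧ q.1 < w) ∧ (w < 0 → w < q.1 ∧ q.1 ≤ 0))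
    (h : p.2 * w + p.1 = q.2 * w + q.1) : p = q := by
  obtain ⟨x1, y1⟩ := p; obtain ⟨x2, y2⟩ := q
  simp only at h hp hq ⊢
  have hmul : (y1 - y2) * w = x2 - x1 := by ring_nf; omega
  have habs : |x2 - x1| < |w| := by
    rcases lt_trichotomy w 0 with hlt | rfl | hgt
    · rw [abs_of_neg hlt]
      have := hp.2 hlt; have := hq.2 hlt
      rw [abs_lt]; omega
    · omega
    · rw [abs_of_pos hgt]
      have := hp.1 hgt; have := hq.1 hgt
      rw [abs_lt]; omega
  have hy : y1 - y2 = 0 := mul_eq_small _ _ _ hmul habs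
  rw [hy, zero_mul] at hmul
  simp only [Prod.mk.injEq]
  omega

-- in a ≤-sorted list, 'no equal neighbours' is exactly Nodup
theorem chain_ne_iff_nodup (l : List Int) (hs : l.Pairwise (· ≤ ·)) :
    l.IsChain (· ≠ ·) ↔ l.Nodup := by
  induction l with
  | nil => simp
  | cons a t ih =>
    rw [List.pairwise_cons] at hs
    rw [List.isChain_cons, List.nodup_cons, ih hs.2]
    constructor
    · rintro ⟨hhd, hnd⟩
      refine ⟨?_, hnd⟩
      intro hmem
      cases t with
      | nil => simp at hmem
      | cons b t' =>
        have hab : a ≤ b := hs.1 b (List.mem_cons_self ..)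
        have hne : a ≠ b := hhd b (by simp)
        rcases List.mem_cons.1 hmem with rfl | hmem'
        · exact hne rfl
        · have hba : b ≤ a := (List.pairwise_cons.1 hs.2).1 a hmem'
          exact hne (le_antisymm hab hba)
    · rintro ⟨hmem, hnd⟩
      refine ⟨?_, hnd⟩
      intro y hy
      cases t with
      | nil => simp at hy
      | cons b t' =>
        simp only [List.head?_cons, Option.mem_def, Option.some.injEq] at hy
        subst hy
        intro h; exact hmem (h ▸ List.mem_cons_self ..)

-- ===== VERDICT (by name: the statement is the Claim_ definition above) =====
theorem check_for_unique_spec : Claim_equal_check_for_unique := by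
  intro robots max_x max_y iteration _ hpre
  unfold Spec_check_for_unique check_for_unique check_for_unique_alt
  rcases hpre with rfl | ⟨hw, hh⟩
  · rfl
  · simp only
    set w := max_x + 1 with hwdef
    set cl := robots.map (fun r =>
      PySem.Int.mod (r.2.1 + iteration * r.2.2.2) (max_y + 1) * w
        + PySem.Int.mod (r.1 + iteration * r.2.2.1) w) with hcl
    have key : cl = (robots.map (pvPos max_x max_y iteration)).map (fun p => p.2 * w + p.1) := by
      rw [List.map_map]; rfl
    have hbound : ∀ p ∈ robots.map (pvPos max_x max_y iteration),
        (0 < w → 0 ≤ p.1 ∧ p.1 < w) ∧ (w < 0 → w < p.1 ∧ p.1 ≤ 0) := by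
      intro p hp
      obtain ⟨r, hr, rfl⟩ := List.mem_map.1 hp
      constructor
      · intro h0
        exact ⟨PySem.Int.mod_nonneg _ h0, PySem.Int.mod_lt _ h0⟩
      · intro hneg
        exact PySem.Int.mod_neg_bounds _ hneg
    rw [Bool.eq_iff_iff, cfuLoop_iff, pvAdjLoop_iff,
        chain_ne_iff_nodup _ (PySem.List.sorted_pairwise cl (fun c => c) ..),
        (PySem.List.sorted_perm cl (fun c => c) false).nodup_iff, key]
    constructor
    · rintro ⟨hn, -⟩
      exact hn.map_on (fun p hp q hq heq => encode_inj w hw p q (hbound p hp) (hbound q hq) heq)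
    · intro h
      refine ⟨h.of_map, ?_⟩
      simp [PySem.Dict.keys, PySem.Dict.empty]
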